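-- pv_equiv track=rewrite | github.com/alexxcode/alphaplus | backend/app/tasks/dataset_extraction.py | _detect_layout
-- ===== SOURCE A (Python) =====
-- def _detect_layout(namelist: list[str], prefix: str) -> str:
--     """
--     Detect the directory layout of the YOLO dataset inside the ZIP.
--
--     Returns one of: "split" | "nested" | "flat" | "unknown"
--     """
--     def _has(d: str) -> bool:
--         return any(n.startswith(prefix + d) for n in namelist)
--
--     # A) Standard split: train/images/ + val/images/
--     if _has("train/images/") and _has("val/images/"):
--         return "split"
--
--     # B) Nested: images/train/ + images/val/ (train/val inside images & labels)
--     if _has("images/train/") and _has("images/val/"):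
--         return "nested"
--
--     # C) Flat: images/ + labels/ with files directly inside (no train/val subdirs)
--     if _has("images/") and _has("labels/"):
--         return "flat"
--
--     return "unknown"
-- ===== SOURCE B (Python) =====
-- def _detect_layout(namelist: list[str], prefix: str) -> str:
--     """
--     Detect the directory layout of the YOLO dataset inside the ZIP.
--
--     Single pass: record which of the six directory markers occur as flags,
--     stopping early once all are seen, then apply the same priority decision.
--     """
--     m_ti = prefix + "train/images/"
--     m_vi = prefix + "val/images/"
--     m_it = prefix + "images/train/"
--     m_iv = prefix + "images/val/"
--     m_im = prefix + "images/"
--     m_lb = prefix + "labels/"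
--     ti = vi = it = iv = im = lb = False
--     for n in namelist:
--         if not ti and n.startswith(m_ti):
--             ti = True
--         if not vi and n.startswith(m_vi):
--             vi = True
--         if not it and n.startswith(m_it):
--             it = True
--         if not iv and n.startswith(m_iv):
--             iv = True
--         if not im and n.startswith(m_im):
--             im = True
--         if not lb and n.startswith(m_lb):
--             lb = True
--         if ti and vi and it and iv and im and lb:
--             break
--     if ti and vi:
--         return "split"
--     if it and iv:
--         return "nested"
--     if im and lb:
--         return "flat"
--     return "unknown"
-- ===== Notes on version B (the rewrite author's own statement) =====
-- stated objective: alternative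
-- what changed: B replaces A's up-to-six separate scans of namelist (one per _has call) with a single pass that records which of the six prefix markers have been seen as boolean flags (breaking once all are seen), then applies the same priority decision.
import Mathlib
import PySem

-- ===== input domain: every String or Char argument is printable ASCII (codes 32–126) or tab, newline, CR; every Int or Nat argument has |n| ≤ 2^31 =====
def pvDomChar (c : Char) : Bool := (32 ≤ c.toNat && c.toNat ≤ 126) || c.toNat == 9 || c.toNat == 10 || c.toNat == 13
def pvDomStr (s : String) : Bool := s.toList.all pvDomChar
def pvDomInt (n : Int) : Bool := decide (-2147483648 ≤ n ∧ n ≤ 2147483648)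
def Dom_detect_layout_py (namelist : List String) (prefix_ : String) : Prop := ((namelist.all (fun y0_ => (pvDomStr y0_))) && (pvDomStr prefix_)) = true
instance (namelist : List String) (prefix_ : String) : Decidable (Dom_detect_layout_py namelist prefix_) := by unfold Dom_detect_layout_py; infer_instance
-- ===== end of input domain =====

-- B changes A's up-to-six separate scans of namelist into one pass collecting six boolean flags (objective: faster by a constant factor).

-- ===== PORT A =====
-- _has(d) = any(n.startswith(prefix + d) for n in namelist)
def pvHas (namelist : List String) (prefix_ : String) (d : String) : Bool :=
  namelist.any (fun n => PySem.Str.startswith n (prefix_ ++ d))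

def detect_layout_py (namelist : List String) (prefix_ : String) : String :=
  if pvHas namelist prefix_ "train/images/" && pvHas namelist prefix_ "val/images/" then "split"
  else if pvHas namelist prefix_ "images/train/" && pvHas namelist prefix_ "images/val/" then "nested"
  else if pvHas namelist prefix_ "images/" && pvHas namelist prefix_ "labels/" then "flat"
  else "unknown"

-- ===== PORT B =====
-- one loop iteration of Source B: the six 'if not flag and n.startswith(...)' updates
def pvStep (prefix_ : String) (s : Bool × Bool × Bool × Bool × Bool × Bool) (n : String) :
    Bool × Bool × Bool × Bool × Bool × Bool :=
  ( if !s.1 && PySem.Str.startswith n (prefix_ ++ "train/images/") then true else s.1,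
    if !s.2.1 && PySem.Str.startswith n (prefix_ ++ "val/images/") then true else s.2.1,
    if !s.2.2.1 && PySem.Str.startswith n (prefix_ ++ "images/train/") then true else s.2.2.1,
    if !s.2.2.2.1 && PySem.Str.startswith n (prefix_ ++ "images/val/") then true else s.2.2.2.1,
    if !s.2.2.2.2.1 && PySem.Str.startswith n (prefix_ ++ "images/") then true else s.2.2.2.2.1,
    if !s.2.2.2.2.2 && PySem.Str.startswith n (prefix_ ++ "labels/") then true else s.2.2.2.2.2 )

-- the for-loop of Source B with its 'break' once all six flags are set
def pvLoop (prefix_ : String) (ns : List String) (s : Bool × Bool × Bool × Bool × Bool × Bool) :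
    Bool × Bool × Bool × Bool × Bool × Bool :=
  match ns with
  | [] => s
  | n :: rest =>
    let s' := pvStep prefix_ s n
    if s'.1 && s'.2.1 && s'.2.2.1 && s'.2.2.2.1 && s'.2.2.2.2.1 && s'.2.2.2.2.2 then s'
    else pvLoop prefix_ rest s'

def detect_layout_py_alt (namelist : List String) (prefix_ : String) : String :=
  let seen := pvLoop prefix_ namelist (false, false, false, false, false, false)
  if seen.1 && seen.2.1 then "split"
  else if seen.2.2.1 && seen.2.2.2.1 then "nested"
  else if seen.2.2.2.2.1 && seen.2.2.2.2.2 then "flat"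
  else "unknown"

-- ===== PRECONDITION & SPEC =====
def Spec_detect_layout_py (namelist : List String) (prefix_ : String) (out : String) : Prop := out = detect_layout_py_alt namelist prefix_
instance (namelist : List String) (prefix_ : String) (out : String) : Decidable (Spec_detect_layout_py namelist prefix_ out) := by unfold Spec_detect_layout_py; infer_instance

-- ===== CLAIM (what is proved, stated in full; the proofs are below) =====
def Claim_equal_detect_layout_py : Prop := ∀ (namelist : List String) (prefix_ : String), Dom_detect_layout_py namelist prefix_ → Spec_detect_layout_py namelist prefix_ (detect_layout_py namelist prefix_)

-- ===== LEMMAS AND PROOFS =====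

-- each flag after the loop is its start value OR-ed with 'some name starts with prefix+marker'
theorem pvLoop_eq (namelist : List String) (prefix_ : String)
    (s : Bool × Bool × Bool × Bool × Bool × Bool) :
    pvLoop prefix_ namelist s =
      ( s.1 || pvHas namelist prefix_ "train/images/",
        s.2.1 || pvHas namelist prefix_ "val/images/",
        s.2.2.1 || pvHas namelist prefix_ "images/train/",
        s.2.2.2.1 || pvHas namelist prefix_ "images/val/",
        s.2.2.2.2.1 || pvHas namelist prefix_ "images/",
        s.2.2.2.2.2 || pvHas namelist prefix_ "labels/" ) := by
  induction namelist generalizing s with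
  | nil => simp [pvLoop, pvHas]
  | cons n ns ih =>
    obtain ⟨a, b, c, d, e, f⟩ := s
    rw [pvLoop]
    have hstep : ∀ (x t : Bool), (if (!x && t) = true then true else x) = (x || t) := by decide
    simp only [pvStep, hstep]
    split
    · next h =>
      -- all six flags already true after this step: the break returns the saturated state
      simp only [Bool.and_eq_true] at h
      obtain ⟨⟨⟨⟨⟨h1, h2⟩, h3⟩, h4⟩, h5⟩, h6⟩ := h
      simp only [pvHas, List.any_cons, ← Bool.or_assoc, h1, h2, h3, h4, h5, h6, Bool.true_or]
    · rw [ih]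
      simp only [pvHas, List.any_cons, Bool.or_assoc]

-- ===== VERDICT (by name: the statement is the Claim_ definition above) =====
theorem detect_layout_py_spec : Claim_equal_detect_layout_py := by
  intro namelist prefix_ _
  unfold Spec_detect_layout_py detect_layout_py detect_layout_py_alt
  rw [pvLoop_eq]
  simp only [Bool.false_or]
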